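-- pv_equiv track=rewrite | github.com/nwpuzhengyan/FindCSV | FindCSV.py | calculate_SV_num
-- ===== SOURCE A (Python) =====
-- def calculate_SV_num(read):
--     SV_num=0
--     for SV in read:
--         if SV[4]=='DEL' or SV[4]=='INS':
--             SV_num+=1
--         elif SV[4]=='INV':
--             SV_num-=1
--     return SV_num
-- ===== SOURCE B (Python) =====
-- def calculate_SV_num(read):
--     types = [SV[4] for SV in read]
--     return types.count('DEL') + types.count('INS') - types.count('INV')
-- ===== Notes on version B (the rewrite author's own statement) =====
-- stated objective: simpler
-- what changed: Replaces the branch-and-accumulate loop with staged passes: project the type column once, then combine three list.count scans arithmetically (no conditional, no running total).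
import Mathlib
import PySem

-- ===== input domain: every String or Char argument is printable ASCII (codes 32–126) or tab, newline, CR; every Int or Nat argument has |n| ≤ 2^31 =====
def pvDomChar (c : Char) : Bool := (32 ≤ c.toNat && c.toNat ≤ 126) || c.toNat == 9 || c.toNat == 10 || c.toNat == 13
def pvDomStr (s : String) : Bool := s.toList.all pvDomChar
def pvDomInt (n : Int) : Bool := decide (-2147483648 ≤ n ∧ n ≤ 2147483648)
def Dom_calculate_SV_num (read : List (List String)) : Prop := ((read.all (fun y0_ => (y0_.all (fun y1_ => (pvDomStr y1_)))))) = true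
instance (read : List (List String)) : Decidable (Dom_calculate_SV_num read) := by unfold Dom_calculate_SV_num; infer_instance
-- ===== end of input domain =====

-- B projects the type column once and combines three list.count scans; same return value as A.

-- ===== PORT A =====
def calculate_SV_num (read : List (List String)) : Int :=
  read.foldl (fun SV_num SV =>
    let t := PySem.List.pyGetD SV 4 ""
    if t = "DEL" ∨ t = "INS" then SV_num + 1
    else if t = "INV" then SV_num - 1
    else SV_num) 0

-- ===== PORT B =====
def calculate_SV_num_alt (read : List (List String)) : Int :=
  let types := read.map (fun SV => PySem.List.pyGetD SV 4 "")
  (types.count "DEL" : Int) + (types.count "INS" : Int) - (types.count "INV" : Int)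

-- ===== PRECONDITION & SPEC =====
-- Pre_ excludes exactly the inputs where some row has fewer than 5 fields: there SV[4] raises IndexError in both A and B.
def Pre_calculate_SV_num (read : List (List String)) : Prop :=
  ∀ SV ∈ read, 5 ≤ SV.length
instance (read : List (List String)) : Decidable (Pre_calculate_SV_num read) := by unfold Pre_calculate_SV_num; infer_instance
def pvWitness_calculate_SV_num : List (List String) :=
  [["c1", "1", "2", "a", "DEL"], ["c1", "3", "4", "b", "INV"]]

def Spec_calculate_SV_num (read : List (List String)) (out : Int) : Prop := out = calculate_SV_num_alt read
instance (read : List (List String)) (out : Int) : Decidable (Spec_calculate_SV_num read out) := by unfold Spec_calculate_SV_num; infer_instance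

-- ===== CLAIM (what is proved, stated in full; the proofs are below) =====
def Claim_equal_calculate_SV_num : Prop := ∀ (read : List (List String)), Dom_calculate_SV_num read → Pre_calculate_SV_num read → Spec_calculate_SV_num read (calculate_SV_num read)

-- ===== LEMMAS AND PROOFS =====

-- loop invariant: A's fold from n equals n plus B's count combination over the remaining rows
theorem pvFoldCounts (l : List (List String)) (n : Int) :
    l.foldl (fun SV_num SV =>
      let t := PySem.List.pyGetD SV 4 ""
      if t = "DEL" ∨ t = "INS" then SV_num + 1
      else if t = "INV" then SV_num - 1
      else SV_num) n
    = n + ((l.map (fun SV => PySem.List.pyGetD SV 4 "")).count "DEL" : Int)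
        + ((l.map (fun SV => PySem.List.pyGetD SV 4 "")).count "INS" : Int)
        - ((l.map (fun SV => PySem.List.pyGetD SV 4 "")).count "INV" : Int) := by
  induction l generalizing n with
  | nil => simp
  | cons SV rest ih =>
    simp only [List.foldl_cons, List.map_cons, List.count_cons]
    rw [ih]
    rcases h1 : decide (PySem.List.pyGetD SV 4 "" = "DEL") with _ | _ <;>
    rcases h2 : decide (PySem.List.pyGetD SV 4 "" = "INS") with _ | _ <;>
    rcases h3 : decide (PySem.List.pyGetD SV 4 "" = "INV") with _ | _ <;>
      simp at h1 h2 h3 <;> simp [h1, h2, h3] <;> push_cast <;> ring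

-- ===== VERDICT (by name: the statement is the Claim_ definition above) =====
theorem calculate_SV_num_spec : Claim_equal_calculate_SV_num := by
  intro read _ _
  show calculate_SV_num read = calculate_SV_num_alt read
  simp only [calculate_SV_num, calculate_SV_num_alt]
  rw [pvFoldCounts]
  ring
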